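-- pv_equiv track=rewrite | github.com/Antonio-III/Python | OC/Problems/Math/Algebra/_01_prealgebra.py | __rewrite_eq
-- ===== SOURCE A (Python) =====
-- def __rewrite_eq(exp: str) -> str:
--     """Replaces single equation symbols with double-equal signs. Does not replace the equal symbol if it's part of an inequality or if the equality is already double-signed.
--
--     Args:
--         exp: The mathematical expression.
--
--     Returns:
--         A new expression where every equality is replaced with a double-equal sign.
--     """
--     new = ""
--
--     exp_l = len(exp)
--
--     for i in range(exp_l):
--         if (exp[i] == "=") and (i > 0) and (i+1 < exp_l):
--             if (exp[i+1] != "=") and (exp[i-1] != "=") and (exp[i-1] != "<") and (exp[i-1] != ">"):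
--                 new += "="
--         new += exp[i]
--
--     return new
-- ===== SOURCE B (Python) =====
-- import re
--
-- def __rewrite_eq(exp: str) -> str:
--     """Replace each single '=' (not part of ==, <=, >=) with '==' via one regex substitution."""
--     return re.sub(r'(?<=[^=<>])=(?=[^=])', '==', exp)
-- ===== Notes on version B (the rewrite author's own statement) =====
-- stated objective: idiomatic
-- what changed: A single regular-expression substitution with a negative-set lookbehind and lookahead replaces the index loop with manual character-by-character accumulation.
import Mathlib
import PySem

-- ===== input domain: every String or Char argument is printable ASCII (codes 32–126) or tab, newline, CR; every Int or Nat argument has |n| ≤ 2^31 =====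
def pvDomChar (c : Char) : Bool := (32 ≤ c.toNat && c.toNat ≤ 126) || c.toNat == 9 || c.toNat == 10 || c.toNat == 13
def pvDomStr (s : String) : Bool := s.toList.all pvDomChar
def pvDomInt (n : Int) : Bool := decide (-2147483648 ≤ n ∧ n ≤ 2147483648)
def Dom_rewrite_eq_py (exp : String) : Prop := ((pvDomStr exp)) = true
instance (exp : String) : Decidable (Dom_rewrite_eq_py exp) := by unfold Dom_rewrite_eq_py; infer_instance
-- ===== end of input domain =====

-- B replaces the index loop and manual accumulation by a single regex substitution
-- re.sub(r'(?<=[^=<>])=(?=[^=])', '==', exp) (idiomatic; ported as a one-pass scan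
-- implementing exactly that substitution's semantics).


-- ===== PORT A =====
-- A's loop body as a fold step over the index range; exp[i] with 0 ≤ i < len is exact via getD.
def pvStepA (l : List Char) (new : List Char) (i : Nat) : List Char :=
  let new2 :=
    if l.getD i ' ' = '=' ∧ 0 < i ∧ i + 1 < l.length ∧
        l.getD (i+1) ' ' ≠ '=' ∧ l.getD (i-1) ' ' ≠ '=' ∧
        l.getD (i-1) ' ' ≠ '<' ∧ l.getD (i-1) ' ' ≠ '>'
    then new ++ ['=']
    else new
  new2 ++ [l.getD i ' ']

def rewrite_eq_py (exp : String) : String :=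
  let l := exp.toList
  String.ofList ((List.range l.length).foldl (pvStepA l) [])

-- ===== PORT B =====
-- One left-to-right pass implementing re.sub(r'(?<=[^=<>])=(?=[^=])', '==', exp):
-- the lookbehind checks the previous original character, the lookahead the next one.
def pvPrevOk : Option Char → Bool
  | none => false
  | some p => p ≠ '=' && p ≠ '<' && p ≠ '>'

def pvNextOk : List Char → Bool
  | [] => false
  | d :: _ => d ≠ '='

def pvSub : Option Char → List Char → List Char
  | _, [] => []
  | prev, c :: rest =>
    if c = '=' && pvPrevOk prev && pvNextOk rest
    then '=' :: '=' :: pvSub (some c) rest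
    else c :: pvSub (some c) rest

def rewrite_eq_py_alt (exp : String) : String :=
  String.ofList (pvSub none exp.toList)

-- ===== PRECONDITION & SPEC =====
def Spec_rewrite_eq_py (exp : String) (out : String) : Prop := out = rewrite_eq_py_alt exp
instance (exp : String) (out : String) : Decidable (Spec_rewrite_eq_py exp out) := by unfold Spec_rewrite_eq_py; infer_instance

-- ===== CLAIM (what is proved, stated in full; the proofs are below) =====
def Claim_equal_rewrite_eq_py : Prop := ∀ (exp : String), Dom_rewrite_eq_py exp → Spec_rewrite_eq_py exp (rewrite_eq_py exp)

-- ===== LEMMAS AND PROOFS =====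

lemma pvKey (l : List Char) : ∀ (k j : Nat) (acc : List Char), j + k = l.length →
    (List.range' j k).foldl (pvStepA l) acc =
      acc ++ pvSub (if j = 0 then none else some (l.getD (j-1) ' ')) (l.drop j) := by
  intro k
  induction k with
  | zero =>
    intro j acc h
    have : l.drop j = [] := List.drop_eq_nil_of_le (by omega)
    simp [this, pvSub]
  | succ k ih =>
    intro j acc h
    have hj : j < l.length := by omega
    have hdrop : l.drop j = l.getD j ' ' :: l.drop (j+1) := by
      rw [List.getD_eq_getElem l ' ' hj]
      exact (List.drop_eq_getElem_cons hj)
    rw [List.range'_succ, List.foldl_cons, ih (j+1) _ (by omega), hdrop]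
    have hnext : pvNextOk (l.drop (j+1)) = decide (j + 1 < l.length ∧ l.getD (j+1) ' ' ≠ '=') := by
      by_cases h1 : j + 1 < l.length
      · have : l.drop (j+1) = l.getD (j+1) ' ' :: l.drop (j+2) := by
          rw [List.getD_eq_getElem l ' ' h1]
          exact (List.drop_eq_getElem_cons h1)
        rw [this]
        generalize l.getD (j+1) ' ' = d
        by_cases h2 : d = '=' <;> simp [pvNextOk, h1, h2]
      · have : l.drop (j+1) = [] := List.drop_eq_nil_of_le (by omega)
        simp [this, pvNextOk, h1]
    have hprev : pvPrevOk (if j = 0 then none else some (l.getD (j-1) ' ')) =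
        decide (0 < j ∧ l.getD (j-1) ' ' ≠ '=' ∧ l.getD (j-1) ' ' ≠ '<' ∧ l.getD (j-1) ' ' ≠ '>') := by
      by_cases h0 : j = 0
      · simp [h0, pvPrevOk]
      · rw [if_neg h0]
        have hp : 0 < j := Nat.pos_of_ne_zero h0
        generalize l.getD (j-1) ' ' = p
        by_cases e1 : p = '=' <;> by_cases e2 : p = '<' <;> by_cases e3 : p = '>' <;>
          simp [pvPrevOk, hp, e1, e2, e3, Bool.and_assoc]
    have hsub : pvSub (if j = 0 then none else some (l.getD (j-1) ' '))
          (l.getD j ' ' :: l.drop (j+1)) =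
        if (decide (l.getD j ' ' = '=') && pvPrevOk (if j = 0 then none else some (l.getD (j-1) ' '))
              && pvNextOk (l.drop (j+1)))
        then '=' :: '=' :: pvSub (some (l.getD j ' ')) (l.drop (j+1))
        else l.getD j ' ' :: pvSub (some (l.getD j ' ')) (l.drop (j+1)) := rfl
    rw [hsub, hprev, hnext]
    have hcond : (decide (l.getD j ' ' = '=') &&
          decide (0 < j ∧ l.getD (j-1) ' ' ≠ '=' ∧ l.getD (j-1) ' ' ≠ '<' ∧ l.getD (j-1) ' ' ≠ '>') &&
          decide (j + 1 < l.length ∧ l.getD (j+1) ' ' ≠ '=')) =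
        decide (l.getD j ' ' = '=' ∧ 0 < j ∧ j + 1 < l.length ∧
          l.getD (j+1) ' ' ≠ '=' ∧ l.getD (j-1) ' ' ≠ '=' ∧
          l.getD (j-1) ' ' ≠ '<' ∧ l.getD (j-1) ' ' ≠ '>') := by
      generalize l.getD j ' ' = cj
      generalize l.getD (j-1) ' ' = cp
      generalize l.getD (j+1) ' ' = cn
      by_cases a : cj = '=' <;>
        by_cases b : (0 < j ∧ cp ≠ '=' ∧ cp ≠ '<' ∧ cp ≠ '>') <;>
        by_cases d : (j + 1 < l.length ∧ cn ≠ '=') <;>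
        simp [a, b, d] <;> tauto
    rw [hcond]
    have hif : (if j + 1 = 0 then none else some (l.getD (j+1-1) ' ')) = some (l.getD j ' ') := by
      simp
    rw [hif]
    unfold pvStepA
    by_cases hc : l.getD j ' ' = '=' ∧ 0 < j ∧ j + 1 < l.length ∧
        l.getD (j+1) ' ' ≠ '=' ∧ l.getD (j-1) ' ' ≠ '=' ∧
        l.getD (j-1) ' ' ≠ '<' ∧ l.getD (j-1) ' ' ≠ '>'
    · rw [if_pos hc, if_pos (decide_eq_true hc), hc.1]
      simp only [List.append_assoc, List.cons_append, List.singleton_append, List.nil_append]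
    · rw [if_neg hc, if_neg (fun hb => hc (of_decide_eq_true hb))]
      simp only [List.append_assoc, List.cons_append, List.singleton_append, List.nil_append]

-- ===== VERDICT (by name: the statement is the Claim_ definition above) =====
theorem rewrite_eq_py_spec : Claim_equal_rewrite_eq_py := by
  intro exp _
  show String.ofList ((List.range exp.toList.length).foldl (pvStepA exp.toList) []) =
    String.ofList (pvSub none exp.toList)
  rw [List.range_eq_range', pvKey exp.toList exp.toList.length 0 [] (by omega)]
  simp
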